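-- pv_equiv track=rewrite | github.com/sosodennis/value-investment-agent | finance-agent-core/src/agents/fundamental/infrastructure/market_data/market_data_service.py | _classify_target_consensus_fallback
-- ===== SOURCE A (Python) =====
-- def _classify_target_consensus_fallback(
--     consensus_warnings: tuple[str, ...],
-- ) -> str:
--     if any("code=provider_blocked_http" in warning for warning in consensus_warnings):
--         return "provider_blocked"
--     if any("code=provider_rate_limited" in warning for warning in consensus_warnings):
--         return "provider_rate_limited"
--     if any(
--         "code=provider_dns_error" in warning
--         or "code=provider_connection_error" in warning
--         for warning in consensus_warnings
--     ):
--         return "provider_network_error"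
--     if any("insufficient_sources=" in warning for warning in consensus_warnings):
--         return "insufficient_sources"
--     if any(
--         "code=" in warning and "_target_mean_missing" in warning
--         for warning in consensus_warnings
--     ):
--         return "provider_parse_missing"
--     if any("parse missing" in warning for warning in consensus_warnings):
--         return "provider_parse_missing"
--     if any("fetch failed:" in warning for warning in consensus_warnings):
--         return "provider_fetch_failed"
--     return "aggregate_unavailable"
-- ===== SOURCE B (Python) =====
-- def _classify_target_consensus_fallback(consensus_warnings):
--     flags = set()
--     for w in consensus_warnings:
--         if "code=provider_blocked_http" in w:
--             flags.add("provider_blocked")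
--         if "code=provider_rate_limited" in w:
--             flags.add("provider_rate_limited")
--         if "code=provider_dns_error" in w or "code=provider_connection_error" in w:
--             flags.add("provider_network_error")
--         if "insufficient_sources=" in w:
--             flags.add("insufficient_sources")
--         if ("code=" in w and "_target_mean_missing" in w) or "parse missing" in w:
--             flags.add("provider_parse_missing")
--         if "fetch failed:" in w:
--             flags.add("provider_fetch_failed")
--     for cat in ("provider_blocked", "provider_rate_limited", "provider_network_error",
--                 "insufficient_sources", "provider_parse_missing", "provider_fetch_failed"):
--         if cat in flags:
--             return cat
--     return "aggregate_unavailable"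
-- ===== Notes on version B (the rewrite author's own statement) =====
-- stated objective: alternative
-- what changed: Seven separate short-circuiting scans over the warnings are replaced by a single pass that collects a set of matched category flags (merging the dns/connection disjunction and the two routes to provider_parse_missing), followed by a first-match lookup over a fixed six-element priority list.
import Mathlib
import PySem

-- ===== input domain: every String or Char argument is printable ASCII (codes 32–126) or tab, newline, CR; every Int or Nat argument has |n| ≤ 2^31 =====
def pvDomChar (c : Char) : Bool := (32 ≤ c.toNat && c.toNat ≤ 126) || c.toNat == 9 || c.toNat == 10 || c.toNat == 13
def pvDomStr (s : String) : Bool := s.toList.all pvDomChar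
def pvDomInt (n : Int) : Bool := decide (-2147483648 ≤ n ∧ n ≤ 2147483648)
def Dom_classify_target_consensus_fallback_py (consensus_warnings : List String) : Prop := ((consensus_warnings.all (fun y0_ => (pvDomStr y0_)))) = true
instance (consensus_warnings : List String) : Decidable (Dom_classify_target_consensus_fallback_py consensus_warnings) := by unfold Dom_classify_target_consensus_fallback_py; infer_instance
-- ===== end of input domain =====

-- B replaces A's seven short-circuiting scans by one pass collecting a set of matched
-- category flags, then a first-match lookup over a fixed priority-ordered category list
-- (alternative decomposition, same cost).


-- ===== PORT A =====
def classify_target_consensus_fallback_py (consensus_warnings : List String) : String :=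
  if consensus_warnings.any (fun w => PySem.Str.isIn "code=provider_blocked_http" w) then
    "provider_blocked"
  else if consensus_warnings.any (fun w => PySem.Str.isIn "code=provider_rate_limited" w) then
    "provider_rate_limited"
  else if consensus_warnings.any (fun w =>
      PySem.Str.isIn "code=provider_dns_error" w || PySem.Str.isIn "code=provider_connection_error" w) then
    "provider_network_error"
  else if consensus_warnings.any (fun w => PySem.Str.isIn "insufficient_sources=" w) then
    "insufficient_sources"
  else if consensus_warnings.any (fun w =>
      PySem.Str.isIn "code=" w && PySem.Str.isIn "_target_mean_missing" w) then
    "provider_parse_missing"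
  else if consensus_warnings.any (fun w => PySem.Str.isIn "parse missing" w) then
    "provider_parse_missing"
  else if consensus_warnings.any (fun w => PySem.Str.isIn "fetch failed:" w) then
    "provider_fetch_failed"
  else
    "aggregate_unavailable"

-- ===== PORT B =====
-- one loop step of Source B: test w against all predicates, record matched category tags
def pvFlagStep (flags : PySem.Set String) (w : String) : PySem.Set String :=
  let flags := if PySem.Str.isIn "code=provider_blocked_http" w then
      PySem.Set.add flags "provider_blocked" else flags
  let flags := if PySem.Str.isIn "code=provider_rate_limited" w then
      PySem.Set.add flags "provider_rate_limited" else flags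
  let flags := if PySem.Str.isIn "code=provider_dns_error" w || PySem.Str.isIn "code=provider_connection_error" w then
      PySem.Set.add flags "provider_network_error" else flags
  let flags := if PySem.Str.isIn "insufficient_sources=" w then
      PySem.Set.add flags "insufficient_sources" else flags
  let flags := if (PySem.Str.isIn "code=" w && PySem.Str.isIn "_target_mean_missing" w) || PySem.Str.isIn "parse missing" w then
      PySem.Set.add flags "provider_parse_missing" else flags
  let flags := if PySem.Str.isIn "fetch failed:" w then
      PySem.Set.add flags "provider_fetch_failed" else flags
  flags

def classify_target_consensus_fallback_py_alt (consensus_warnings : List String) : String :=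
  let flags := consensus_warnings.foldl pvFlagStep PySem.Set.empty
  match ["provider_blocked", "provider_rate_limited", "provider_network_error",
         "insufficient_sources", "provider_parse_missing", "provider_fetch_failed"].find?
        (fun cat => PySem.Set.contains flags cat) with
  | some cat => cat
  | none => "aggregate_unavailable"

-- ===== PRECONDITION & SPEC =====
def Spec_classify_target_consensus_fallback_py (consensus_warnings : List String) (out : String) : Prop := out = classify_target_consensus_fallback_py_alt consensus_warnings
instance (consensus_warnings : List String) (out : String) : Decidable (Spec_classify_target_consensus_fallback_py consensus_warnings out) := by unfold Spec_classify_target_consensus_fallback_py; infer_instance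

-- ===== CLAIM (what is proved, stated in full; the proofs are below) =====
def Claim_equal_classify_target_consensus_fallback_py : Prop := ∀ (consensus_warnings : List String), Dom_classify_target_consensus_fallback_py consensus_warnings → Spec_classify_target_consensus_fallback_py consensus_warnings (classify_target_consensus_fallback_py consensus_warnings)

-- ===== LEMMAS AND PROOFS =====
theorem contains_foldl_step (cat : String) (p : String → Bool)
    (hstep : ∀ flags w, PySem.Set.contains (pvFlagStep flags w) cat
      = (PySem.Set.contains flags cat || p w)) :
    ∀ (ws : List String) (flags : PySem.Set String),
      PySem.Set.contains (ws.foldl pvFlagStep flags) cat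
        = (PySem.Set.contains flags cat || ws.any p) := by
  intro ws
  induction ws with
  | nil => simp
  | cons w rest ih =>
      intro flags
      rw [List.foldl_cons, ih (pvFlagStep flags w), hstep, Bool.or_assoc, List.any_cons]

-- discharges one 'hstep' obligation: unfold the step, push 'contains' through the ifs
theorem contains_empty_str (c : String) :
    PySem.Set.contains (PySem.Set.empty : PySem.Set String) c = false := by
  simp [PySem.Set.contains, PySem.Set.empty]

theorem contains_step_blocked (flags : PySem.Set String) (w : String) :
    PySem.Set.contains (pvFlagStep flags w) "provider_blocked"
      = (PySem.Set.contains flags "provider_blocked" || PySem.Str.isIn "code=provider_blocked_http" w) := by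
  unfold pvFlagStep
  split_ifs <;> simp_all

theorem contains_step_rate (flags : PySem.Set String) (w : String) :
    PySem.Set.contains (pvFlagStep flags w) "provider_rate_limited"
      = (PySem.Set.contains flags "provider_rate_limited" || PySem.Str.isIn "code=provider_rate_limited" w) := by
  unfold pvFlagStep
  split_ifs <;> simp_all

theorem contains_step_network (flags : PySem.Set String) (w : String) :
    PySem.Set.contains (pvFlagStep flags w) "provider_network_error"
      = (PySem.Set.contains flags "provider_network_error"
          || (PySem.Str.isIn "code=provider_dns_error" w || PySem.Str.isIn "code=provider_connection_error" w)) := by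
  unfold pvFlagStep
  split_ifs <;> simp_all

theorem contains_step_insufficient (flags : PySem.Set String) (w : String) :
    PySem.Set.contains (pvFlagStep flags w) "insufficient_sources"
      = (PySem.Set.contains flags "insufficient_sources" || PySem.Str.isIn "insufficient_sources=" w) := by
  unfold pvFlagStep
  split_ifs <;> simp_all

theorem contains_step_parse (flags : PySem.Set String) (w : String) :
    PySem.Set.contains (pvFlagStep flags w) "provider_parse_missing"
      = (PySem.Set.contains flags "provider_parse_missing"
          || ((PySem.Str.isIn "code=" w && PySem.Str.isIn "_target_mean_missing" w) || PySem.Str.isIn "parse missing" w)) := by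
  unfold pvFlagStep
  split_ifs <;> simp_all

theorem contains_step_fetch (flags : PySem.Set String) (w : String) :
    PySem.Set.contains (pvFlagStep flags w) "provider_fetch_failed"
      = (PySem.Set.contains flags "provider_fetch_failed" || PySem.Str.isIn "fetch failed:" w) := by
  unfold pvFlagStep
  split_ifs <;> simp_all

theorem any_or_split (ws : List String) (p q : String → Bool) :
    ws.any (fun w => p w || q w) = (ws.any p || ws.any q) := by
  induction ws with
  | nil => simp
  | cons w rest ih =>
      simp [List.any_cons, ih]
      cases p w <;> cases q w <;> simp [Bool.or_comm]

-- ===== VERDICT (by name: the statement is the Claim_ definition above) =====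
theorem classify_target_consensus_fallback_py_spec : Claim_equal_classify_target_consensus_fallback_py := by
  intro ws _
  unfold Spec_classify_target_consensus_fallback_py
  unfold classify_target_consensus_fallback_py classify_target_consensus_fallback_py_alt
  simp only [List.find?,
    contains_foldl_step _ _ contains_step_blocked ws PySem.Set.empty,
    contains_foldl_step _ _ contains_step_rate ws PySem.Set.empty,
    contains_foldl_step _ _ contains_step_network ws PySem.Set.empty,
    contains_foldl_step _ _ contains_step_insufficient ws PySem.Set.empty,
    contains_foldl_step _ _ contains_step_parse ws PySem.Set.empty,
    contains_foldl_step _ _ contains_step_fetch ws PySem.Set.empty,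
    any_or_split ws (fun w => PySem.Str.isIn "code=" w && PySem.Str.isIn "_target_mean_missing" w)
      (fun w => PySem.Str.isIn "parse missing" w),
    contains_empty_str, Bool.false_or]
  cases h1 : ws.any (fun w => PySem.Str.isIn "code=provider_blocked_http" w) <;>
  cases h2 : ws.any (fun w => PySem.Str.isIn "code=provider_rate_limited" w) <;>
  cases h3 : ws.any (fun w => PySem.Str.isIn "code=provider_dns_error" w || PySem.Str.isIn "code=provider_connection_error" w) <;>
  cases h4 : ws.any (fun w => PySem.Str.isIn "insufficient_sources=" w) <;>
  cases h5 : ws.any (fun w => PySem.Str.isIn "code=" w && PySem.Str.isIn "_target_mean_missing" w) <;>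
  cases h6 : ws.any (fun w => PySem.Str.isIn "parse missing" w) <;>
  cases h7 : ws.any (fun w => PySem.Str.isIn "fetch failed:" w) <;>
  simp [h1, h2, h3, h4, h5, h6, h7]
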